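-- pv_equiv track=rewrite | github.com/HomogeneousTools/ZeroLocus64 | python/src/zerolocus64/__init__.py | _encode_natural
-- ===== SOURCE A (Python) =====
-- BASE62 = "0123456789ABCDEFGHIJKLMNOPQRSTUVWXYZabcdefghijklmnopqrstuvwxyz"
--
-- def _encode_characters(value: int, width: int) -> str:
--     """Encode ``value`` as exactly ``width`` base-62 characters."""
--
--     if width < 0:
--         raise ValueError("width must be non-negative")
--     if width == 0:
--         if value:
--             raise ValueError("non-zero value does not fit in width 0")
--         return ""
--     if not 0 <= value < 62**width:
--         raise ValueError("value does not fit in character width")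
--     characters = []
--     remaining = value
--     for _ in range(width):
--         characters.append(BASE62[remaining % 62])
--         remaining //= 62
--     return "".join(reversed(characters))
--
-- def _encode_natural(value: int) -> str:
--     """Encode a positive integer in the shortest available character width."""
--
--     if value <= 0:
--         raise ValueError("natural must be positive")
--     width = 1
--     capacity = 62
--     while value >= capacity:
--         width += 1
--         capacity *= 62
--     return _encode_characters(value, width)
-- ===== SOURCE B (Python) =====
-- BASE62 = "0123456789ABCDEFGHIJKLMNOPQRSTUVWXYZabcdefghijklmnopqrstuvwxyz"
--
-- def _encode_natural(value: int) -> str: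
--     """Encode a positive integer in the shortest available character width."""
--     if value <= 0:
--         raise ValueError("natural must be positive")
--     digits = []
--     remaining = value
--     while remaining:
--         digits.append(BASE62[remaining % 62])
--         remaining //= 62
--     return "".join(reversed(digits))
-- ===== Notes on version B (the rewrite author's own statement) =====
-- stated objective: simpler
-- what changed: Replaced the width pre-computation loop plus the fixed-width _encode_characters helper (with its guard checks) by one standard data-driven base-62 loop that divides until the value is exhausted; A's minimal width guarantees identical digits with no leading zero.
import Mathlib
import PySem

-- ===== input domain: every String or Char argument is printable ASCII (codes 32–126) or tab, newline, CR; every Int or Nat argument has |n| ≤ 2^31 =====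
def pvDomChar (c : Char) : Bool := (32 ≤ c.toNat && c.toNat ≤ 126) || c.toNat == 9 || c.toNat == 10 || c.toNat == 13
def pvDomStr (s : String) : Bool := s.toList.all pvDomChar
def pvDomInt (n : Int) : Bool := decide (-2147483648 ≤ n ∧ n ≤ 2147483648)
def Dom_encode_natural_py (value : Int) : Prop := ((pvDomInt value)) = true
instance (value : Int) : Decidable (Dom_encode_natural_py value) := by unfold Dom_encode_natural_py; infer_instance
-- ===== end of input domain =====

-- B drops A's width pre-computation and the fixed-width helper for one standard
-- divide-until-zero base-62 loop (objective: simpler); equal because A's width is minimal.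

-- ===== PORT A =====
def pvBase62 : List Char := "0123456789ABCDEFGHIJKLMNOPQRSTUVWXYZabcdefghijklmnopqrstuvwxyz".toList

-- BASE62[i] for 0 ≤ i < 62 (here i = r % 62, always in range; the default is never hit)
def pvB62 (i : Int) : Char := (PySem.List.pyGet? pvBase62 i).getD ' '

-- 'for _ in range(width): characters.append(BASE62[remaining % 62]); remaining //= 62'
def pvEncLoop : Nat → Int → List Char → List Char
  | 0, _, acc => acc
  | n+1, r, acc => pvEncLoop n (PySem.Int.floordiv r 62) (acc ++ [pvB62 (PySem.Int.mod r 62)])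

def encode_characters_py (value : Int) (width : Int) : String :=
  if width < 0 then ""                                        -- raise ValueError (outside Pre_)
  else if width = 0 then ""                                   -- raise if value ≠ 0, else ""  (outside Pre_)
  else if ¬ (0 ≤ value ∧ value < 62 ^ width.toNat) then ""    -- raise ValueError (outside Pre_)
  else String.ofList (pvEncLoop width.toNat value []).reverse -- "".join(reversed(characters))

-- 'width = 1; capacity = 62; while value >= capacity: width += 1; capacity *= 62'
-- (fuel makes the loop total; value.toNat + 1 steps always suffice — see pvWidthLoop_spec)
def pvWidthLoop : Nat → Int → Int × Int → Int × Int
  | 0, _, wc => wc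
  | f+1, v, (w, c) => if c ≤ v then pvWidthLoop f v (w+1, c*62) else (w, c)

def encode_natural_py (value : Int) : String :=
  if value ≤ 0 then ""   -- raise ValueError("natural must be positive"); excluded by Pre_
  else encode_characters_py value (pvWidthLoop (value.toNat+1) value (1, 62)).1

-- ===== PORT B =====
-- 'while remaining: digits.append(BASE62[remaining % 62]); remaining //= 62'
-- (the r ≤ 0 guard only makes the recursion total; B reaches it exactly when remaining = 0)
def pvAltDigits (r : Int) : List Char :=
  if r ≤ 0 then []
  else pvB62 (PySem.Int.mod r 62) :: pvAltDigits (PySem.Int.floordiv r 62)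
termination_by r.toNat
decreasing_by
  rename_i h
  rw [PySem.Int.floordiv_eq_ediv_of_pos (by omega)]
  omega

def encode_natural_py_alt (value : Int) : String :=
  if value ≤ 0 then ""   -- raise ValueError("natural must be positive"); excluded by Pre_
  else String.ofList (pvAltDigits value).reverse

-- ===== PRECONDITION & SPEC =====
-- A (and B) raise ValueError("natural must be positive") exactly when value ≤ 0.
def Pre_encode_natural_py (value : Int) : Prop := 1 ≤ value
instance (value : Int) : Decidable (Pre_encode_natural_py value) := by unfold Pre_encode_natural_py; infer_instance
def pvWitness_encode_natural_py : Int := (5)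

def Spec_encode_natural_py (value : Int) (out : String) : Prop := out = encode_natural_py_alt value
instance (value : Int) (out : String) : Decidable (Spec_encode_natural_py value out) := by unfold Spec_encode_natural_py; infer_instance

-- ===== CLAIM (what is proved, stated in full; the proofs are below) =====
def Claim_equal_encode_natural_py : Prop := ∀ (value : Int), Dom_encode_natural_py value → Pre_encode_natural_py value → Spec_encode_natural_py value (encode_natural_py value)

-- ===== LEMMAS AND PROOFS =====

theorem pv62_le_pow {k : Nat} (hk : 1 ≤ k) : (62:Int) ≤ 62 ^ k := by
  calc (62:Int) = 62 ^ 1 := (pow_one _).symm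
  _ ≤ 62 ^ k := pow_le_pow_right₀ (by norm_num) hk

-- the width loop returns (w, 62^w) with 62^(w-1) ≤ v < 62^w (stated as v < c ∧ c ≤ 62*v)
theorem pvWidthLoop_spec (fuel : Nat) : ∀ (v w c : Int), 1 ≤ v → 1 ≤ w → c = 62 ^ w.toNat →
    c ≤ 62 * v → v < c + 62 * fuel →
    1 ≤ (pvWidthLoop fuel v (w, c)).1 ∧
    (pvWidthLoop fuel v (w, c)).2 = 62 ^ (pvWidthLoop fuel v (w, c)).1.toNat ∧
    v < (pvWidthLoop fuel v (w, c)).2 ∧ (pvWidthLoop fuel v (w, c)).2 ≤ 62 * v := by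
  induction fuel with
  | zero =>
    intro v w c hv hw hc hcv hfuel
    simp only [pvWidthLoop]
    refine ⟨hw, hc, by omega, hcv⟩
  | succ f ih =>
    intro v w c hv hw hc hcv hfuel
    have hc62 : (62:Int) ≤ c := hc ▸ pv62_le_pow (by omega)
    simp only [pvWidthLoop]
    split
    · rename_i hle
      have hc' : c * 62 = 62 ^ (w+1).toNat := by
        have : (w+1).toNat = w.toNat + 1 := by omega
        rw [this, pow_succ, hc]
      have h62 : c + 62 ≤ c * 62 := by nlinarith
      push_cast at hfuel
      exact ih v (w+1) (c*62) hv (by omega) hc' (by nlinarith) (by omega)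
    · rename_i hgt
      exact ⟨hw, hc, by omega, hcv⟩

-- the inner loop of _encode_characters, with the accumulator peeled off
def pvDigs : Nat → Int → List Char
  | 0, _ => []
  | k+1, r => pvB62 (PySem.Int.mod r 62) :: pvDigs k (PySem.Int.floordiv r 62)

theorem pvEncLoop_eq (k : Nat) : ∀ (r : Int) (acc : List Char),
    pvEncLoop k r acc = acc ++ pvDigs k r := by
  induction k with
  | zero => intro r acc; simp [pvEncLoop, pvDigs]
  | succ n ih => intro r acc; simp [pvEncLoop, pvDigs, ih, List.append_assoc]

-- A's k+1 fixed digits equal B's digits when 62^k ≤ v < 62^(k+1) (minimal width: no leading zero)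
theorem pvDigs_eq_alt (k : Nat) : ∀ (v : Int), 62 ^ k ≤ v → v < 62 ^ (k+1) →
    pvDigs (k+1) v = pvAltDigits v := by
  induction k with
  | zero =>
    intro v h1 h2
    norm_num at h1 h2
    rw [pvAltDigits, if_neg (by omega), pvDigs, pvDigs]
    have h0 : PySem.Int.floordiv v 62 = 0 := by
      rw [PySem.Int.floordiv_eq_ediv_of_pos (by omega)]
      exact Int.ediv_eq_zero_of_lt (by omega) h2
    rw [h0, pvAltDigits]
    simp
  | succ m ih =>
    intro v h1 h2
    have hv : (62:Int) ≤ v := le_trans (pv62_le_pow (by omega)) h1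
    rw [pvAltDigits, if_neg (by omega), pvDigs]
    congr 1
    apply ih
    · rw [PySem.Int.le_floordiv_iff_mul_le (by norm_num)]
      calc (62:Int) ^ m * 62 = 62 ^ (m+1) := by rw [pow_succ]
      _ ≤ v := h1
    · rw [PySem.Int.floordiv_lt_iff_lt_mul (by norm_num)]
      calc v < 62 ^ (m+1+1) := h2
      _ = 62 ^ (m+1) * 62 := by rw [pow_succ]

-- ===== VERDICT (by name: the statement is the Claim_ definition above) =====
theorem encode_natural_py_spec : Claim_equal_encode_natural_py := by
  intro value _ hpre
  unfold Spec_encode_natural_py encode_natural_py encode_natural_py_alt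
  have hv : 1 ≤ value := hpre
  rw [if_neg (by omega), if_neg (by omega)]
  obtain ⟨hw1, hc, hvc, hcv⟩ := pvWidthLoop_spec (value.toNat+1) value 1 62 hv (by omega)
    (by norm_num) (by omega) (by omega)
  set p := pvWidthLoop (value.toNat+1) value (1, 62) with hp
  unfold encode_characters_py
  rw [if_neg (by omega), if_neg (by omega), if_neg (by simp only [not_not]; exact ⟨by omega, by rw [← hc]; omega⟩)]
  obtain ⟨m, hm⟩ : ∃ m, p.1.toNat = m + 1 := ⟨p.1.toNat - 1, by omega⟩
  rw [pvEncLoop_eq, List.nil_append, hm]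
  congr 2
  apply pvDigs_eq_alt
  · -- 62^m ≤ value, from 62^(m+1) = p.2 ≤ 62*value
    have : (62:Int) ^ (m+1) ≤ 62 * value := by rw [← hm, ← hc]; exact hcv
    rw [pow_succ, mul_comm] at this
    exact le_of_mul_le_mul_left this (by norm_num)
  · rw [← hm, ← hc]; exact hvc
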